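-- pv_equiv track=rewrite | github.com/leila100/coding-exercises | codeSignal/theCore/mirrorLake/isSubstitutionCipher.py | isSubstitutionCipher
-- ===== SOURCE A (Python) =====
-- def isSubstitutionCipher(string1, string2):
--     if len(string1) != len(string2):
--         return False
--     visited = {}
--     used = set()
--     for i, char in enumerate(string1):
--         if char in visited:
--             if string2[i] != visited[char]:
--                 return False
--         else:
--             if string2[i] in used:
--                 return False
--             used.add(string2[i])
--             visited[char] = string2[i]
--     return True
-- ===== SOURCE B (Python) =====
-- def isSubstitutionCipher(string1, string2):
--     if len(string1) != len(string2):
--         return False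
--     first1 = {}
--     for i, c in enumerate(string1):
--         if c not in first1:
--             first1[c] = i
--     first2 = {}
--     for i, c in enumerate(string2):
--         if c not in first2:
--             first2[c] = i
--     return all(first1[a] == first2[b] for a, b in zip(string1, string2))
-- ===== Notes on version B (the rewrite author's own statement) =====
-- stated objective: alternative
-- what changed: Replaces A's single scan that co-maintains a forward map and a used-target set with early exits by computing two independent first-occurrence-index tables and comparing them positionally (the strings match under a bijective substitution iff their first-occurrence profiles coincide).
import Mathlib
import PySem

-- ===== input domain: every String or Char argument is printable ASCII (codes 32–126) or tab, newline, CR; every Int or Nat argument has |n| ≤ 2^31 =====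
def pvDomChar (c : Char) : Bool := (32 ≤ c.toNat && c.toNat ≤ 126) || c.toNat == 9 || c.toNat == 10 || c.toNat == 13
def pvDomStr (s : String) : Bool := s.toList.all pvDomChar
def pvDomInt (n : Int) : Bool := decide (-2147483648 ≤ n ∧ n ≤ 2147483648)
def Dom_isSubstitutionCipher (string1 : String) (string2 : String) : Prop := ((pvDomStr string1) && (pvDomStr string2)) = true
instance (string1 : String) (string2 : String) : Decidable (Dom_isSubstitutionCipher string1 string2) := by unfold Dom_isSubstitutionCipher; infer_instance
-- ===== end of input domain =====

-- B replaces A's single scan (forward map + used-target set, early exits) by two independent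
-- first-occurrence-index tables compared positionally: an alternative algorithm, same cost.

-- ===== PORT A =====
-- for i, char in enumerate(string1): string2[i] is checked against 'visited' (forward map)
-- and 'used' (target set), returning False at the first conflict.
-- ('char in visited' followed by 'visited[char]' is ported as one match on visited.get? char;
-- the none branch of pyGet? is Python's IndexError, unreachable under the length guard.)
def pvLoopA (l2 : List Char) : List (Int × Char) → PySem.Dict Char Char → PySem.Set Char → Bool
  | [], _, _ => true
  | (i, c) :: rest, visited, used =>
    match PySem.List.pyGet? l2 i with
    | none => false
    | some t =>
      match visited.get? c with
      | some v => if t ≠ v then false else pvLoopA l2 rest visited used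
      | none =>
        if PySem.Set.contains used t then false
        else pvLoopA l2 rest (visited.insert c t) (PySem.Set.add used t)

def isSubstitutionCipher (string1 : String) (string2 : String) : Bool :=
  if PySem.Str.len string1 ≠ PySem.Str.len string2 then false
  else pvLoopA string2.toList (PySem.List.enumerate string1.toList 0) PySem.Dict.empty PySem.Set.empty

-- ===== PORT B =====
-- first = {}; for i, c in enumerate(s): if c not in first: first[c] = i
def pvFirstOcc (l : List Char) : PySem.Dict Char Int :=
  (PySem.List.enumerate l 0).foldl
    (fun d p => if d.contains p.2 then d else d.insert p.2 p.1) PySem.Dict.empty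

def isSubstitutionCipher_alt (string1 : String) (string2 : String) : Bool :=
  if PySem.Str.len string1 ≠ PySem.Str.len string2 then false
  else
    let first1 := pvFirstOcc string1.toList
    let first2 := pvFirstOcc string2.toList
    -- first1[a] == first2[b]: both keys are always present (a ∈ string1, b ∈ string2),
    -- so both lookups are ported as get? and the results compared as options.
    (string1.toList.zip string2.toList).all (fun p => first1.get? p.1 == first2.get? p.2)

-- ===== PRECONDITION & SPEC =====
def Spec_isSubstitutionCipher (string1 : String) (string2 : String) (out : Bool) : Prop := out = isSubstitutionCipher_alt string1 string2
instance (string1 : String) (string2 : String) (out : Bool) : Decidable (Spec_isSubstitutionCipher string1 string2 out) := by unfold Spec_isSubstitutionCipher; infer_instance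

-- ===== CLAIM (what is proved, stated in full; the proofs are below) =====
def Claim_equal_isSubstitutionCipher : Prop := ∀ (string1 : String) (string2 : String), Dom_isSubstitutionCipher string1 string2 → Spec_isSubstitutionCipher string1 string2 (isSubstitutionCipher string1 string2)

-- ===== LEMMAS AND PROOFS =====

-- the invariant A maintains: 'used' is exactly the image of 'visited', which is injective
def pvInv (V : PySem.Dict Char Char) (U : PySem.Set Char) : Prop :=
  (∀ t, t ∈ U ↔ ∃ c, V.get? c = some t) ∧
  (∀ c c' t, V.get? c = some t → V.get? c' = some t → c = c')
lemma pvInv_empty : pvInv PySem.Dict.empty PySem.Set.empty := by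
  constructor
  · intro t; simp [PySem.Set.empty, PySem.Dict.get?_empty]
  · intro c c' t h; simp [PySem.Dict.get?_empty] at h
lemma pvInv_insert (V : PySem.Dict Char Char) (U : PySem.Set Char) (c t : Char)
    (h : pvInv V U) (hc : V.get? c = none) (ht : t ∉ U) :
    pvInv (V.insert c t) (PySem.Set.add U t) := by
  obtain ⟨hUV, hinj⟩ := h
  constructor
  · intro t'
    rw [PySem.Set.mem_add]
    constructor
    · rintro (h' | rfl)
      · obtain ⟨c', hco⟩ := (hUV t').1 h'
        refine ⟨c', ?_⟩
        rw [PySem.Dict.get?_insert]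
        have hne : c' ≠ c := fun e => by rw [e, hc] at hco; simp at hco
        simp [hne, hco]
      · exact ⟨c, by simp⟩
    · rintro ⟨c', hco⟩
      rw [PySem.Dict.get?_insert] at hco
      by_cases e : c' = c
      · simp [e] at hco; right; exact hco.symm
      · simp [e] at hco; left; exact (hUV t').2 ⟨c', hco⟩
  · intro c1 c2 t' h1 h2
    rw [PySem.Dict.get?_insert] at h1 h2
    by_cases e1 : c1 = c <;> by_cases e2 : c2 = c
    · rw [e1, e2]
    · simp [e1] at h1; simp [e2] at h2
      rw [← h1] at h2
      exact absurd ((hUV t).2 ⟨c2, h2⟩) ht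
    · simp [e1] at h1; simp [e2] at h2
      rw [← h2] at h1
      exact absurd ((hUV t).2 ⟨c1, h1⟩) ht
    · simp [e1] at h1; simp [e2] at h2
      exact hinj c1 c2 t' h1 h2


def pvGood (L : List (Char × Char)) (V : PySem.Dict Char Char) (U : PySem.Set Char) : Prop :=
  (∀ p ∈ L, ∀ q ∈ L, (p.1 = q.1 ↔ p.2 = q.2)) ∧
  (∀ p ∈ L, (∀ v, V.get? p.1 = some v → p.2 = v) ∧ (V.get? p.1 = none → p.2 ∉ U))


lemma pvGood_cons (L : List (Char × Char)) (V : PySem.Dict Char Char) (U : PySem.Set Char)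
    (c t : Char)
    (cross : ∀ q ∈ L, (c = q.1 ↔ t = q.2))
    (head2 : (∀ v, V.get? c = some v → t = v) ∧ (V.get? c = none → t ∉ U))
    (h1 : ∀ p ∈ L, ∀ q ∈ L, (p.1 = q.1 ↔ p.2 = q.2))
    (h2 : ∀ p ∈ L, (∀ v, V.get? p.1 = some v → p.2 = v) ∧ (V.get? p.1 = none → p.2 ∉ U)) :
    pvGood ((c, t) :: L) V U := by
  refine ⟨?_, ?_⟩
  · intro p hp q hq
    rcases List.mem_cons.1 hp with rfl | hp <;> rcases List.mem_cons.1 hq with rfl | hq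
    · simp
    · exact cross q hq
    · exact ⟨fun e => ((cross p hp).1 e.symm).symm, fun e => ((cross p hp).2 e.symm).symm⟩
    · exact h1 p hp q hq
  · intro p hp
    rcases List.mem_cons.1 hp with rfl | hp
    · exact head2
    · exact h2 p hp


lemma pvGood_cons_mapped (L : List (Char × Char)) (V : PySem.Dict Char Char) (U : PySem.Set Char)
    (c t : Char) (h : pvInv V U) (hc : V.get? c = some t) :
    pvGood ((c, t) :: L) V U ↔ pvGood L V U := by
  obtain ⟨hUV, hinj⟩ := h
  constructor
  · rintro ⟨h1, h2⟩
    exact ⟨fun p hp q hq => h1 p (by simp [hp]) q (by simp [hq]),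
           fun p hp => h2 p (by simp [hp])⟩
  · rintro ⟨h1, h2⟩
    have cross : ∀ q ∈ L, (c = q.1 ↔ t = q.2) := by
      intro q hq
      obtain ⟨hq1, hq2⟩ := h2 q hq
      constructor
      · intro e; exact (hq1 t (by rw [← e, hc])).symm
      · intro e
        cases hv : V.get? q.1 with
        | some v =>
          have hqv : q.2 = v := hq1 v hv
          exact hinj c q.1 t hc (by rw [hv, ← hqv, ← e])
        | none =>
          exfalso
          exact (hq2 hv) (e ▸ (hUV t).2 ⟨c, hc⟩)
    refine pvGood_cons L V U c t cross ?_ h1 h2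
    refine ⟨fun v hv => Option.some.inj (hc.symm.trans hv), fun hn => ?_⟩
    rw [hc] at hn; simp at hn


lemma pvGood_cons_fresh (L : List (Char × Char)) (V : PySem.Dict Char Char) (U : PySem.Set Char)
    (c t : Char) (h : pvInv V U) (hc : V.get? c = none) (ht : t ∉ U) :
    pvGood ((c, t) :: L) V U ↔ pvGood L (V.insert c t) (PySem.Set.add U t) := by
  obtain ⟨hUV, hinj⟩ := h
  constructor
  · rintro ⟨h1, h2⟩
    refine ⟨fun p hp q hq => h1 p (by simp [hp]) q (by simp [hq]), ?_⟩
    intro q hq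
    have hcross := h1 (c, t) (by simp) q (by simp [hq])
    obtain ⟨hq1, hq2⟩ := h2 q (by simp [hq])
    by_cases e : q.1 = c
    · have hget : (V.insert c t).get? q.1 = some t := by
        rw [PySem.Dict.get?_insert]; simp [e]
      refine ⟨fun v hv => ?_, fun hn => ?_⟩
      · rw [hget] at hv
        rw [← Option.some.inj hv]
        exact (hcross.1 e.symm).symm
      · rw [hget] at hn; simp at hn
    · have hget : (V.insert c t).get? q.1 = V.get? q.1 := by
        rw [PySem.Dict.get?_insert]; simp [e]
      refine ⟨fun v hv => hq1 v (by rw [← hget, hv]), fun hn => ?_⟩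
      rw [hget] at hn
      intro hmem
      rcases (PySem.Set.mem_add U t q.2).1 hmem with hmem | e2
      · exact hq2 hn hmem
      · exact e (hcross.2 e2.symm).symm
  · rintro ⟨h1, h2⟩
    have cross : ∀ q ∈ L, (c = q.1 ↔ t = q.2) := by
      intro q hq
      obtain ⟨hq1, hq2⟩ := h2 q hq
      constructor
      · intro e
        refine (hq1 t ?_).symm
        rw [PySem.Dict.get?_insert]
        simp [e.symm]
      · intro e
        by_contra hne
        have hne' : ¬ q.1 = c := fun h' => hne h'.symm
        have hget : (V.insert c t).get? q.1 = V.get? q.1 := by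
          rw [PySem.Dict.get?_insert]; simp [hne']
        cases hv : V.get? q.1 with
        | some v =>
          have hqv : q.2 = v := hq1 v (by rw [hget, hv])
          exact ht ((hUV t).2 ⟨q.1, by rw [hv, ← hqv, ← e]⟩)
        | none =>
          have hnmem : q.2 ∉ PySem.Set.add U t := hq2 (by rw [hget, hv])
          exact hnmem ((PySem.Set.mem_add U t q.2).2 (Or.inr e.symm))
    refine pvGood_cons L V U c t cross ⟨fun v hv => by rw [hc] at hv; simp at hv, fun _ => ht⟩ ?_ ?_
    · intro p hp q hq; exact h1 p hp q hq
    · intro p hp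
      obtain ⟨hq1, hq2⟩ := h2 p hp
      by_cases e : p.1 = c
      · refine ⟨fun v hv => by rw [e, hc] at hv; simp at hv, fun _ => ?_⟩
        have hpt : p.2 = t := hq1 t (by rw [PySem.Dict.get?_insert]; simp [e])
        rw [hpt]; exact ht
      · have hget : (V.insert c t).get? p.1 = V.get? p.1 := by
          rw [PySem.Dict.get?_insert]; simp [e]
        refine ⟨fun v hv => hq1 v (by rw [hget]; exact hv), fun hn => fun hmem => ?_⟩
        exact (hq2 (by rw [hget, hn])) ((PySem.Set.mem_add U t p.2).2 (Or.inl hmem))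


-- unfolding equation for pvLoopA on a cons cell
lemma pvLoopA_cons (l2 : List Char) (i : Int) (c : Char) (rest : List (Int × Char))
    (V : PySem.Dict Char Char) (U : PySem.Set Char) :
    pvLoopA l2 ((i, c) :: rest) V U =
      (match PySem.List.pyGet? l2 i with
      | none => false
      | some t =>
        match V.get? c with
        | some v => if t ≠ v then false else pvLoopA l2 rest V U
        | none =>
          if PySem.Set.contains U t then false
          else pvLoopA l2 rest (V.insert c t) (PySem.Set.add U t)) := rfl


-- A's loop accepts exactly the 'pairwise consistent' pair lists, relative to its state
lemma pvLoopA_iff (l1 : List Char) : ∀ (tl2 pre : List Char)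
    (V : PySem.Dict Char Char) (U : PySem.Set Char),
    tl2.length = l1.length → pvInv V U →
    (pvLoopA (pre ++ tl2) (PySem.List.enumerate l1 (pre.length : Int)) V U = true ↔
      pvGood (l1.zip tl2) V U) := by
  induction l1 with
  | nil =>
    intro tl2 pre V U hlen hinv
    have : tl2 = [] := List.eq_nil_of_length_eq_zero hlen
    subst this
    simp [PySem.List.enumerate, pvLoopA, pvGood]
  | cons c cs ih =>
    intro tl2 pre V U hlen hinv
    cases tl2 with
    | nil => simp at hlen
    | cons t ts =>
      have hlen' : ts.length = cs.length := by simpa using hlen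
      have hget : PySem.List.pyGet? (pre ++ t :: ts) ((pre.length : Int)) = some t := by
        rw [PySem.List.pyGet?_natCast]
        rw [List.getElem?_append_right (le_refl pre.length)]
        simp
      rw [PySem.List.enumerate_cons, pvLoopA_cons]
      have hsplit : pre ++ t :: ts = (pre ++ [t]) ++ ts := by simp
      have hlen1 : (pre.length : Int) + 1 = ((pre ++ [t]).length : Int) := by
        simp
      cases hv : V.get? c with
      | some v =>
        simp only [hget]
        by_cases he : t = v
        · subst he
          rw [if_neg (by simp)]
          rw [hsplit, hlen1, ih ts (pre ++ [t]) V U hlen' hinv]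
          exact (pvGood_cons_mapped (cs.zip ts) V U c t hinv hv).symm
        · rw [if_pos (by simpa using he)]
          simp only [List.zip_cons_cons]
          constructor
          · intro h; simp at h
          · rintro ⟨_, h2⟩
            obtain ⟨hq1, _⟩ := h2 (c, t) (by simp)
            exact absurd (hq1 v hv) he
      | none =>
        simp only [hget]
        by_cases hu : t ∈ U
        · have hcont : PySem.Set.contains U t = true := (PySem.Set.contains_iff U t).2 hu
          rw [hcont, if_pos rfl]
          simp only [List.zip_cons_cons]
          constructor
          · intro h; simp at h
          · rintro ⟨_, h2⟩
            obtain ⟨_, hq2⟩ := h2 (c, t) (by simp)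
            exact absurd hu (hq2 hv)
        · have hcont : PySem.Set.contains U t = false := by
            cases h : PySem.Set.contains U t
            · rfl
            · exact absurd ((PySem.Set.contains_iff U t).1 h) hu
          rw [hcont, if_neg (by simp)]
          rw [hsplit, hlen1, ih ts (pre ++ [t]) _ _ hlen' (pvInv_insert V U c t hinv hv hu)]
          simp only [List.zip_cons_cons]
          exact (pvGood_cons_fresh (cs.zip ts) V U c t hinv hv hu).symm

-- B's first-occurrence table looks up to the first index of a character
lemma pvFirstOcc_general (l : List Char) : ∀ (s : Int) (d : PySem.Dict Char Int) (c : Char),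
    ((PySem.List.enumerate l s).foldl
        (fun d p => if d.contains p.2 then d else d.insert p.2 p.1) d).get? c
      = ((d.get? c).or ((PySem.List.index? l c).map (fun n : Nat => s + (n : Int)))) := by
  induction l with
  | nil =>
    intro s d c
    simp [PySem.List.enumerate, PySem.List.index?_eq_idxOf?]
  | cons x xs ih =>
    intro s d c
    rw [PySem.List.enumerate_cons]
    simp only [List.foldl_cons]
    rw [ih]
    by_cases hx : d.contains x = true
    · rw [if_pos hx]
      by_cases hc : c = x
      · subst hc
        rw [PySem.Dict.contains_eq_isSome_get?] at hx
        obtain ⟨v, hv⟩ := Option.isSome_iff_exists.1 hx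
        rw [hv]
        simp
      · have hxc : x ≠ c := fun e => hc e.symm
        rw [PySem.List.index?_cons_of_ne xs hxc]
        cases d.get? c with
        | some v => simp
        | none =>
          simp only [Option.none_or, Option.map_map]
          congr 1
          funext n
          simp
          omega
    · rw [if_neg hx]
      have hdn : d.get? x = none := by
        rw [PySem.Dict.contains_eq_isSome_get?] at hx
        cases h : d.get? x
        · rfl
        · rw [h] at hx; simp at hx
      by_cases hc : c = x
      · subst hc
        rw [PySem.Dict.get?_insert_self, hdn]
        rw [PySem.List.index?_cons_self _ xs]
        simp
      · have hxc : x ≠ c := fun e => hc e.symm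
        rw [PySem.Dict.get?_insert_of_ne d _ hc]
        rw [PySem.List.index?_cons_of_ne xs hxc]
        cases d.get? c with
        | some v => simp
        | none =>
          simp only [Option.none_or, Option.map_map]
          congr 1
          funext n
          simp
          omega


lemma pvFirstOcc_get? (l : List Char) (c : Char) :
    (pvFirstOcc l).get? c = (PySem.List.index? l c).map (fun n : Nat => (n : Int)) := by
  rw [pvFirstOcc, pvFirstOcc_general l 0 PySem.Dict.empty c]
  simp [PySem.Dict.get?_empty]


-- index? as 'first position': getElem characterisation
lemma pvIndex?_iff (l : List Char) (c : Char) (k : Nat) :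
    PySem.List.index? l c = some k ↔
      ∃ h : k < l.length, l[k] = c ∧ ∀ j (hj : j < k), l[j] ≠ c := by
  constructor
  · intro h
    obtain ⟨hk, h1, h2⟩ := PySem.List.getElem_of_index?_eq_some h
    exact ⟨hk, h1, h2⟩
  · rintro ⟨hk, h1, h2⟩
    rw [PySem.List.index?_eq_some_iff]
    refine ⟨l.take k, l.drop (k + 1), ?_, ?_, ?_⟩
    · rw [← h1]
      conv_lhs => rw [← List.take_append_drop k l]
      congr 1
      exact List.drop_eq_getElem_cons hk
    · simp [Nat.min_eq_left (le_of_lt hk)]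
    · intro hmem
      obtain ⟨j, hj, hje⟩ := List.getElem_of_mem hmem
      rw [List.getElem_take] at hje
      have hjk : j < k := lt_of_lt_of_le hj (by simp)
      exact h2 j hjk hje


-- first-occurrence profiles coincide iff the pairings are consistent both ways
lemma pvBridge (l1 l2 : List Char) (hlen : l2.length = l1.length) :
    (∀ p ∈ l1.zip l2, PySem.List.index? l1 p.1 = PySem.List.index? l2 p.2) ↔
      (∀ p ∈ l1.zip l2, ∀ q ∈ l1.zip l2, (p.1 = q.1 ↔ p.2 = q.2)) := by
  have hzlen : (l1.zip l2).length = l1.length := by simp [hlen]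
  have hpair : ∀ (i : Nat) (hi : i < l1.length),
      (l1[i], l2[i]'(by omega)) ∈ l1.zip l2 := by
    intro i hi
    have hiz : i < (l1.zip l2).length := by rw [hzlen]; exact hi
    have := List.getElem_zip (l := l1) (l' := l2) (i := i) (h := hiz)
    rw [← this]
    exact List.getElem_mem hiz
  have hmem : ∀ p ∈ l1.zip l2, ∃ (i : Nat) (hi : i < l1.length),
      p = (l1[i], l2[i]'(by omega)) := by
    intro p hp
    obtain ⟨i, hi, he⟩ := List.mem_iff_getElem.1 hp
    have hi1 : i < l1.length := by rw [← hzlen]; exact hi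
    refine ⟨i, hi1, ?_⟩
    rw [← he, List.getElem_zip]
  constructor
  · -- index profiles equal → pairwise consistent
    intro h p hp q hq
    obtain ⟨i, hi, rfl⟩ := hmem p hp
    obtain ⟨j, hj, rfl⟩ := hmem q hq
    simp only
    constructor
    · intro e
      have h1 := h _ (hpair i hi)
      have h2 := h _ (hpair j hj)
      simp only at h1 h2
      rw [e] at h1
      rw [h2] at h1
      -- h1 : index? l2 l2[i] = index? l2 l2[j]
      have hs : (PySem.List.index? l2 (l2[i]'(by omega))).isSome = true :=
        (PySem.List.index?_isSome_iff _ _).2 (List.getElem_mem (by omega))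
      obtain ⟨k, hk⟩ := Option.isSome_iff_exists.1 hs
      obtain ⟨hk1, he1, _⟩ := (pvIndex?_iff l2 _ k).1 hk
      rw [hk] at h1
      obtain ⟨hk2, he2, _⟩ := (pvIndex?_iff l2 _ k).1 h1
      rw [← he1, ← he2]
    · intro e
      have h1 := h _ (hpair i hi)
      have h2 := h _ (hpair j hj)
      simp only at h1 h2
      rw [e] at h1
      rw [← h2] at h1
      -- h1 : index? l1 l1[i] = index? l1 l1[j]
      have hs : (PySem.List.index? l1 (l1[i]'hi)).isSome = true :=
        (PySem.List.index?_isSome_iff _ _).2 (List.getElem_mem hi)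
      obtain ⟨k, hk⟩ := Option.isSome_iff_exists.1 hs
      obtain ⟨hk1, he1, _⟩ := (pvIndex?_iff l1 _ k).1 hk
      rw [hk] at h1
      obtain ⟨hk2, he2, _⟩ := (pvIndex?_iff l1 _ k).1 h1.symm
      rw [← he1, ← he2]
  · -- pairwise consistent → index profiles equal
    intro h p hp
    obtain ⟨i, hi, rfl⟩ := hmem p hp
    simp only
    have hs : (PySem.List.index? l1 (l1[i]'hi)).isSome = true :=
      (PySem.List.index?_isSome_iff _ _).2 (List.getElem_mem hi)
    obtain ⟨k, hk⟩ := Option.isSome_iff_exists.1 hs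
    obtain ⟨hk1, he1, hmin⟩ := (pvIndex?_iff l1 _ k).1 hk
    rw [hk]
    symm
    rw [pvIndex?_iff]
    have hcons := h _ (hpair k hk1) _ (hpair i hi)
    simp only at hcons
    refine ⟨by omega, hcons.1 he1, ?_⟩
    intro j hj hje
    have hjlt : j < l2.length := by omega
    have hj1 : j < l1.length := by omega
    have hcons2 := h _ (hpair j hj1) _ (hpair i hi)
    simp only at hcons2
    exact hmin j hj (hcons2.2 hje)

-- ===== VERDICT (by name: the statement is the Claim_ definition above) =====
theorem isSubstitutionCipher_spec : Claim_equal_isSubstitutionCipher := by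
  intro s1 s2 _
  show isSubstitutionCipher s1 s2 = isSubstitutionCipher_alt s1 s2
  unfold isSubstitutionCipher isSubstitutionCipher_alt
  by_cases hl : PySem.Str.len s1 = PySem.Str.len s2
  · rw [if_neg (fun h => h hl), if_neg (fun h => h hl)]
    have hlen : s2.toList.length = s1.toList.length := by
      rw [PySem.Str.len_eq, PySem.Str.len_eq] at hl
      exact_mod_cast hl.symm
    have hA := pvLoopA_iff s1.toList s2.toList [] PySem.Dict.empty PySem.Set.empty hlen pvInv_empty
    simp only [List.nil_append, List.length_nil, Nat.cast_zero] at hA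
    have hGoodEmpty : pvGood (s1.toList.zip s2.toList) PySem.Dict.empty PySem.Set.empty ↔
        (∀ p ∈ s1.toList.zip s2.toList, ∀ q ∈ s1.toList.zip s2.toList, (p.1 = q.1 ↔ p.2 = q.2)) := by
      unfold pvGood
      constructor
      · rintro ⟨h1, _⟩; exact h1
      · intro h1
        refine ⟨h1, fun p hp => ⟨fun v hv => ?_, fun _ hmem => ?_⟩⟩
        · rw [PySem.Dict.get?_empty] at hv; simp at hv
        · simp [PySem.Set.empty] at hmem
    have hB : ((s1.toList.zip s2.toList).all
        (fun p => (pvFirstOcc s1.toList).get? p.1 == (pvFirstOcc s2.toList).get? p.2) = true) ↔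
        (∀ p ∈ s1.toList.zip s2.toList,
          PySem.List.index? s1.toList p.1 = PySem.List.index? s2.toList p.2) := by
      rw [List.all_eq_true]
      constructor
      · intro h p hp
        have := h p hp
        rw [beq_iff_eq, pvFirstOcc_get?, pvFirstOcc_get?] at this
        exact Option.map_injective (fun a b e => by exact_mod_cast e) this
      · intro h p hp
        rw [beq_iff_eq, pvFirstOcc_get?, pvFirstOcc_get?, h p hp]
    rw [Bool.eq_iff_iff, hA, hGoodEmpty, hB, pvBridge s1.toList s2.toList hlen]
  · rw [if_pos hl, if_pos hl]
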